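-- pv_equiv track=rewrite | github.com/ms-jpq/narc-t9 | rplugin/python3/nap_clients/dictionary.py | parse_cword
-- ===== SOURCE A (Python) =====
-- from typing import Any, AsyncIterator, Dict, Iterator, Sequence, cast
--
-- def parse_cword(word: str) -> str:
--     def cont() -> Iterator[str]:
--         for c in reversed(word):
--             if c.isalnum():
--                 yield c
--             else:
--                 break
--
--     cword = "".join(cont())[::-1]
--     return cword
-- ===== SOURCE B (Python) =====
-- def parse_cword(word: str) -> str:
--     start = 0
--     for i, c in enumerate(word):
--         if not c.isalnum():
--             start = i + 1
--     return word[start:]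
-- ===== Notes on version B (the rewrite author's own statement) =====
-- stated objective: simpler
-- what changed: Forward single pass keeping the index after the last non-alphanumeric character and returning one slice, instead of collecting characters backwards from the end with a break, joining and reversing the result.
import Mathlib
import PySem

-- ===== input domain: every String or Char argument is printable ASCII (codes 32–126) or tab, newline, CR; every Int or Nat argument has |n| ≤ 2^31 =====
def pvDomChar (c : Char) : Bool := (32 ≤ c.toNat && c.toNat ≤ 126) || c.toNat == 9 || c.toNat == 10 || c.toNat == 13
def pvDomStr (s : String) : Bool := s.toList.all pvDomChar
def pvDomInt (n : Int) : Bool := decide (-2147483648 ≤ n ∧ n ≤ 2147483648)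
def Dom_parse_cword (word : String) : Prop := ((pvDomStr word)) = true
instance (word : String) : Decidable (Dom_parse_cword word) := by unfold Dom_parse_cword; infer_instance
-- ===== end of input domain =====

-- B replaces A's backward collect-join-reverse with a forward scan that keeps the index
-- after the last non-alphanumeric character and returns one slice (objective: simpler).

-- ===== PORT A =====
-- the generator `cont`: walk the reversed word, yield while alnum, break at the first non-alnum
def pvContA : List Char → List Char
  | [] => []
  | c :: rest => if PySem.Chars.isalnum c then c :: pvContA rest else []

def parse_cword (word : String) : String :=
  String.ofList (pvContA word.toList.reverse).reverse

-- ===== PORT B =====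
-- `for i, c in enumerate(word): if not c.isalnum(): start = i + 1` then `word[start:]`
def parse_cword_alt (word : String) : String :=
  let l := word.toList
  let start : Int :=
    (PySem.List.enumerate l 0).foldl
      (fun s ic => if !(PySem.Chars.isalnum ic.2) then ic.1 + 1 else s) 0
  String.ofList (PySem.List.slice l (some start) none)

-- ===== PRECONDITION & SPEC =====
def Spec_parse_cword (word : String) (out : String) : Prop := out = parse_cword_alt word
instance (word : String) (out : String) : Decidable (Spec_parse_cword word out) := by unfold Spec_parse_cword; infer_instance

-- ===== CLAIM (what is proved, stated in full; the proofs are below) =====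
def Claim_equal_parse_cword : Prop := ∀ (word : String), Dom_parse_cword word → Spec_parse_cword word (parse_cword word)

-- ===== LEMMAS AND PROOFS =====
lemma pvCore (l : List Char) : ∃ n : Nat, n ≤ l.length ∧
    (PySem.List.enumerate l 0).foldl
      (fun s ic => if !(PySem.Chars.isalnum ic.2) then ic.1 + 1 else s) 0 = (n : Int) ∧
    (pvContA l.reverse).reverse = l.drop n := by
  induction l using List.reverseRecOn with
  | nil => exact ⟨0, by simp [pvContA, PySem.List.enumerate]⟩
  | append_singleton l a ih =>
      obtain ⟨n, hle, hfold, hval⟩ := ih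
      rw [List.reverse_append, List.reverse_singleton, List.singleton_append, pvContA]
      by_cases h : PySem.Chars.isalnum a
      · refine ⟨n, by simpa using Nat.le_succ_of_le hle, ?_, ?_⟩
        · rw [PySem.List.enumerate_append, List.foldl_append, hfold]
          simp [PySem.List.enumerate_cons, h]
        · rw [if_pos h, List.reverse_cons, hval, List.drop_append_of_le_length hle]
      · refine ⟨l.length + 1, by simp, ?_, ?_⟩
        · rw [PySem.List.enumerate_append, List.foldl_append, hfold]
          simp only [Bool.not_eq_true] at h
          simp [PySem.List.enumerate_cons, h]
        · simp only [Bool.not_eq_true] at h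
          rw [if_neg (by simp [h]), List.reverse_nil,
              List.drop_eq_nil_iff.mpr (by simp)]

-- ===== VERDICT (by name: the statement is the Claim_ definition above) =====
theorem parse_cword_spec : Claim_equal_parse_cword := by
  intro word _
  unfold Spec_parse_cword parse_cword parse_cword_alt
  obtain ⟨n, _, hfold, hval⟩ := pvCore word.toList
  simp only [hfold, hval, PySem.List.slice_from_natCast]
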